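-- pv_equiv track=rewrite | github.com/davidrogger/trybe-project-job-insights | src/insights.py | get_salary_from
-- ===== SOURCE A (Python) =====
-- def is_bigger_than_current_salary(source_salary, current_salary):
--     return source_salary > current_salary
--
-- def is_smaller_than_currenty_salary(source_salary, current_salary):
--     return source_salary < current_salary
--
-- def get_salary_from(source, key, initial_salary):
--     salary_types = {
--         "min_salary": is_smaller_than_currenty_salary,
--         "max_salary": is_bigger_than_current_salary,
--     }
--     filtered_salary = initial_salary
--
--     for job in source:
--         if job[key].isnumeric():
--             salary_converted_int = int(job[key])
--             if salary_types[key](salary_converted_int, filtered_salary):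
--                 filtered_salary = salary_converted_int
--
--     return filtered_salary
-- ===== SOURCE B (Python) =====
-- def get_salary_from(source, key, initial_salary):
--     salaries = [int(job[key]) for job in source if job[key].isnumeric()]
--     if not salaries:
--         return initial_salary
--     ordered = sorted([initial_salary] + salaries)
--     return {"min_salary": ordered[0], "max_salary": ordered[-1]}[key]
-- ===== Notes on version B (the rewrite author's own statement) =====
-- stated objective: alternative
-- what changed: Replaces the running-comparator fold with extract-all-numeric-salaries, sort the list together with the initial salary, and read the answer off an endpoint of the sorted order (first element for min_salary, last for max_salary).
import Mathlib
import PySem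

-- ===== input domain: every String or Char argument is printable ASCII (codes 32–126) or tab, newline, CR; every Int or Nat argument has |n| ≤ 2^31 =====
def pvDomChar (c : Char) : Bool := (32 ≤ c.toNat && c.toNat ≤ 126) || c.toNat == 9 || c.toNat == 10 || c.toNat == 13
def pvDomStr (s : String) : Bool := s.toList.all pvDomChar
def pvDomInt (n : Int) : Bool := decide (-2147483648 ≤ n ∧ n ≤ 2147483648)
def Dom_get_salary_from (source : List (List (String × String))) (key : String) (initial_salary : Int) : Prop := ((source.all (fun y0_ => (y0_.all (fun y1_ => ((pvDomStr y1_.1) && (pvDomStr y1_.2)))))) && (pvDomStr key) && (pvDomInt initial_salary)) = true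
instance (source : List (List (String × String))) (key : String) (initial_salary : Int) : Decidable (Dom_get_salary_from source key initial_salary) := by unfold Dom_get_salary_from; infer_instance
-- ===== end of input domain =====

-- B replaces A's running-comparator fold by "collect the numeric salaries, sort them with the
-- initial salary, read the answer off an endpoint of the sorted order" (objective: alternative).

-- ===== PORT A =====
-- job[key] (dict access, first match); "" only reached outside Pre_ (Python raises KeyError there)
def pvJobGet (job : List (String × String)) (key : String) : String :=
  ((PySem.Dict.mk job).get? key).getD ""

def is_bigger_than_current_salary (source_salary current_salary : Int) : Bool :=
  source_salary > current_salary

def is_smaller_than_currenty_salary (source_salary current_salary : Int) : Bool :=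
  source_salary < current_salary

-- the salary_types dict of A; lookup with a never-true default comparator outside Pre_ (Python raises KeyError there)
def pvSalaryTypes : PySem.Dict String (Int → Int → Bool) :=
  PySem.Dict.mk [("min_salary", is_smaller_than_currenty_salary), ("max_salary", is_bigger_than_current_salary)]

-- .isnumeric() ported as strIsdigit: on the printable-ASCII domain the two coincide (both = nonempty all-0-9)
def get_salary_from (source : List (List (String × String))) (key : String) (initial_salary : Int) : Int :=
  source.foldl (fun filtered_salary job =>
    if PySem.Str.strIsdigit (pvJobGet job key) then
      let salary_converted_int := (PySem.Int.ofStr? (pvJobGet job key)).getD 0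
      if ((pvSalaryTypes.get? key).getD (fun _ _ => false)) salary_converted_int filtered_salary then
        salary_converted_int
      else filtered_salary
    else filtered_salary) initial_salary

-- ===== PORT B =====
def get_salary_from_alt (source : List (List (String × String))) (key : String) (initial_salary : Int) : Int :=
  let salaries := (source.filter (fun job => PySem.Str.strIsdigit (pvJobGet job key))).map
      (fun job => (PySem.Int.ofStr? (pvJobGet job key)).getD 0)
  if salaries.isEmpty then initial_salary
  else
    let ordered := PySem.List.sorted (initial_salary :: salaries) (fun x => x) false
    (((PySem.Dict.mk [("min_salary", PySem.List.pyGetD ordered 0 0),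
                      ("max_salary", PySem.List.pyGetD ordered (-1) 0)]).get? key).getD 0)

-- ===== PRECONDITION & SPEC =====
-- Pre_ excludes exactly the inputs where Python A raises KeyError: a job without `key`,
-- or a key other than "min_salary"/"max_salary" while some job's value is numeric.
def Pre_get_salary_from (source : List (List (String × String))) (key : String) (initial_salary : Int) : Prop :=
  (∀ job ∈ source, ((PySem.Dict.mk job).get? key).isSome) ∧
  ((∃ job ∈ source, PySem.Str.strIsdigit (pvJobGet job key)) →
    key = "min_salary" ∨ key = "max_salary")
instance (source : List (List (String × String))) (key : String) (initial_salary : Int) : Decidable (Pre_get_salary_from source key initial_salary) := by unfold Pre_get_salary_from; infer_instance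

def pvWitness_get_salary_from : (List (List (String × String))) × String × Int :=
  ([[("min_salary", "100")], [("min_salary", "x")]], "min_salary", 50)

def Spec_get_salary_from (source : List (List (String × String))) (key : String) (initial_salary : Int) (out : Int) : Prop := out = get_salary_from_alt source key initial_salary
instance (source : List (List (String × String))) (key : String) (initial_salary : Int) (out : Int) : Decidable (Spec_get_salary_from source key initial_salary out) := by unfold Spec_get_salary_from; infer_instance

-- ===== CLAIM (what is proved, stated in full; the proofs are below) =====
def Claim_equal_get_salary_from : Prop := ∀ (source : List (List (String × String))) (key : String) (initial_salary : Int), Dom_get_salary_from source key initial_salary → Pre_get_salary_from source key initial_salary → Spec_get_salary_from source key initial_salary (get_salary_from source key initial_salary)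

-- ===== LEMMAS AND PROOFS =====

-- the numeric salaries extracted by B
def pvSalaries (source : List (List (String × String))) (key : String) : List Int :=
  (source.filter (fun job => PySem.Str.strIsdigit (pvJobGet job key))).map
      (fun job => (PySem.Int.ofStr? (pvJobGet job key)).getD 0)

theorem pvSalaries_cons (job : List (String × String)) (rest : List (List (String × String))) (key : String) :
    pvSalaries (job :: rest) key =
      if PySem.Str.strIsdigit (pvJobGet job key) then
        ((PySem.Int.ofStr? (pvJobGet job key)).getD 0) :: pvSalaries rest key
      else pvSalaries rest key := by
  simp only [pvSalaries, List.filter_cons]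
  split <;> simp

-- A's fold with the min comparator is the running-min over B's salary list
theorem fold_min_eq (source : List (List (String × String))) (init : Int) :
    get_salary_from source "min_salary" init = (pvSalaries source "min_salary").foldl min init := by
  induction source generalizing init with
  | nil => simp [get_salary_from, pvSalaries]
  | cons job rest ih =>
    have hrec : ∀ i, get_salary_from (job :: rest) "min_salary" i =
        (if PySem.Str.strIsdigit (pvJobGet job "min_salary") then
          (if is_smaller_than_currenty_salary ((PySem.Int.ofStr? (pvJobGet job "min_salary")).getD 0) i then
            get_salary_from rest "min_salary" ((PySem.Int.ofStr? (pvJobGet job "min_salary")).getD 0)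
          else get_salary_from rest "min_salary" i)
        else get_salary_from rest "min_salary" i) := by
      intro i
      simp only [get_salary_from, List.foldl_cons, pvSalaryTypes]
      split <;> [skip; rfl]
      simp [PySem.Dict.get?_mk_cons]
      split <;> rfl
    rw [hrec, pvSalaries_cons]
    split
    · rw [List.foldl_cons]
      have : min init ((PySem.Int.ofStr? (pvJobGet job "min_salary")).getD 0) =
          (if is_smaller_than_currenty_salary ((PySem.Int.ofStr? (pvJobGet job "min_salary")).getD 0) init then
            ((PySem.Int.ofStr? (pvJobGet job "min_salary")).getD 0) else init) := by
        simp only [is_smaller_than_currenty_salary, decide_eq_true_eq]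
        split <;> omega
      rw [this]; split <;> exact ih _
    · exact ih init

-- A's fold with the max comparator is the running-max over B's salary list
theorem fold_max_eq (source : List (List (String × String))) (init : Int) :
    get_salary_from source "max_salary" init = (pvSalaries source "max_salary").foldl max init := by
  induction source generalizing init with
  | nil => simp [get_salary_from, pvSalaries]
  | cons job rest ih =>
    have hrec : ∀ i, get_salary_from (job :: rest) "max_salary" i =
        (if PySem.Str.strIsdigit (pvJobGet job "max_salary") then
          (if is_bigger_than_current_salary ((PySem.Int.ofStr? (pvJobGet job "max_salary")).getD 0) i then
            get_salary_from rest "max_salary" ((PySem.Int.ofStr? (pvJobGet job "max_salary")).getD 0)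
          else get_salary_from rest "max_salary" i)
        else get_salary_from rest "max_salary" i) := by
      intro i
      simp only [get_salary_from, List.foldl_cons, pvSalaryTypes]
      split <;> [skip; rfl]
      simp [PySem.Dict.get?_mk_cons]
      split <;> rfl
    rw [hrec, pvSalaries_cons]
    split
    · rw [List.foldl_cons]
      have : max init ((PySem.Int.ofStr? (pvJobGet job "max_salary")).getD 0) =
          (if is_bigger_than_current_salary ((PySem.Int.ofStr? (pvJobGet job "max_salary")).getD 0) init then
            ((PySem.Int.ofStr? (pvJobGet job "max_salary")).getD 0) else init) := by
        simp only [is_bigger_than_current_salary, decide_eq_true_eq]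
        split <;> omega
      rw [this]; split <;> exact ih _
    · exact ih init

-- with no numeric job, A's fold never updates its accumulator (any key)
theorem fold_id_of_no_numeric (source : List (List (String × String))) (key : String) (init : Int)
    (h : ∀ job ∈ source, ¬ PySem.Str.strIsdigit (pvJobGet job key)) :
    get_salary_from source key init = init := by
  induction source generalizing init with
  | nil => rfl
  | cons job rest ih =>
    have h1 := h job (by simp)
    simp only [get_salary_from, List.foldl_cons] at *
    rw [if_neg (by simpa using h1)]
    exact ih init (fun j hj => h j (List.mem_cons_of_mem _ hj))

theorem pvSalaries_nil_of_no_numeric (source : List (List (String × String))) (key : String)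
    (h : ∀ job ∈ source, ¬ PySem.Str.strIsdigit (pvJobGet job key)) :
    pvSalaries source key = [] := by
  simp only [pvSalaries, List.map_eq_nil_iff, List.filter_eq_nil_iff]
  exact fun j hj => by simpa using h j hj

-- the running min is a member of init :: xs and a lower bound of it
theorem foldl_min_mem (xs : List Int) (init : Int) : xs.foldl min init ∈ init :: xs := by
  induction xs generalizing init with
  | nil => simp
  | cons x t ih =>
    rw [List.foldl_cons]
    rcases List.mem_cons.mp (ih (min init x)) with h | h
    · rw [h]
      rcases le_total init x with hle | hle
      · simp [min_eq_left hle]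
      · simp [min_eq_right hle]
    · simp [h]

theorem foldl_min_le (xs : List Int) (init : Int) :
    ∀ y ∈ init :: xs, xs.foldl min init ≤ y := by
  induction xs generalizing init with
  | nil => intro y hy; simp at hy; simp [hy]
  | cons x t ih =>
    intro y hy
    rw [List.foldl_cons]
    rcases List.mem_cons.mp hy with h | hy2
    · rw [h]; exact le_trans (ih (min init x) (min init x) (by simp)) (min_le_left _ _)
    rcases List.mem_cons.mp hy2 with h | h
    · rw [h]; exact le_trans (ih (min init x) (min init x) (by simp)) (min_le_right _ _)
    · exact ih _ y (List.mem_cons_of_mem _ h)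

theorem foldl_max_mem (xs : List Int) (init : Int) : xs.foldl max init ∈ init :: xs := by
  induction xs generalizing init with
  | nil => simp
  | cons x t ih =>
    rw [List.foldl_cons]
    rcases List.mem_cons.mp (ih (max init x)) with h | h
    · rw [h]
      rcases le_total init x with hle | hle
      · simp [max_eq_right hle]
      · simp [max_eq_left hle]
    · simp [h]

theorem foldl_max_ge (xs : List Int) (init : Int) :
    ∀ y ∈ init :: xs, y ≤ xs.foldl max init := by
  induction xs generalizing init with
  | nil => intro y hy; simp at hy; simp [hy]
  | cons x t ih =>
    intro y hy
    rw [List.foldl_cons]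
    rcases List.mem_cons.mp hy with h | hy2
    · rw [h]; exact le_trans (le_max_left _ _) (ih (max init x) (max init x) (by simp))
    rcases List.mem_cons.mp hy2 with h | h
    · rw [h]; exact le_trans (le_max_right _ _) (ih (max init x) (max init x) (by simp))
    · exact ih _ y (List.mem_cons_of_mem _ h)

-- in a ≤-pairwise list, every element is at most the last one
theorem pairwise_le_getLast (l : List Int) (h : l.Pairwise (· ≤ ·)) (hne : l ≠ []) :
    ∀ y ∈ l, y ≤ l.getLast hne := by
  induction l with
  | nil => simp at hne
  | cons x t ih =>
    intro y hy
    cases t with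
    | nil => simp at hy; simp [hy]
    | cons z s =>
      rw [List.getLast_cons (by simp : z :: s ≠ [])]
      rcases List.mem_cons.mp hy with h1 | h1
      · subst h1
        exact le_trans ((List.pairwise_cons.mp h).1 z (by simp))
          (ih (List.pairwise_cons.mp h).2 (by simp) z (by simp))
      · exact ih (List.pairwise_cons.mp h).2 (by simp) y h1

-- head of sorted(init :: xs) = running min
theorem sorted_head_eq_foldl_min (xs : List Int) (init : Int) :
    PySem.List.pyGetD (PySem.List.sorted (init :: xs) (fun x => x) false) 0 0 = xs.foldl min init := by
  have hperm := PySem.List.sorted_perm (init :: xs) (fun x : Int => x) false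
  have hne : PySem.List.sorted (init :: xs) (fun x : Int => x) false ≠ [] := by
    intro h; have := hperm.length_eq; simp [h] at this
  obtain ⟨m, t, hs⟩ := List.exists_cons_of_ne_nil hne
  rw [hs, PySem.List.pyGetD_zero_cons]
  have hmle : ∀ y ∈ init :: xs, m ≤ y := PySem.List.key_head_sorted_le (init :: xs) (fun x => x) hs
  have hmmem : m ∈ init :: xs := by
    have : m ∈ PySem.List.sorted (init :: xs) (fun x : Int => x) false := by simp [hs]
    exact (PySem.List.mem_sorted _ _ _ _).mp this
  exact le_antisymm (hmle _ (foldl_min_mem xs init)) (foldl_min_le xs init m hmmem)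

-- last of sorted(init :: xs) = running max
theorem sorted_last_eq_foldl_max (xs : List Int) (init : Int) :
    PySem.List.pyGetD (PySem.List.sorted (init :: xs) (fun x => x) false) (-1) 0 = xs.foldl max init := by
  have hperm := PySem.List.sorted_perm (init :: xs) (fun x : Int => x) false
  have hne : PySem.List.sorted (init :: xs) (fun x : Int => x) false ≠ [] := by
    intro h; have := hperm.length_eq; simp [h] at this
  rw [PySem.List.pyGetD_neg_one _ _ hne]
  have hpw : (PySem.List.sorted (init :: xs) (fun x : Int => x) false).Pairwise (· ≤ ·) := by
    have := PySem.List.sorted_pairwise (init :: xs) (fun x : Int => x)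
    simpa using this
  have hge := pairwise_le_getLast _ hpw hne
  have hLmem : (PySem.List.sorted (init :: xs) (fun x : Int => x) false).getLast hne ∈ init :: xs :=
    (PySem.List.mem_sorted _ _ _ _).mp (List.getLast_mem hne)
  have hfmem : xs.foldl max init ∈ PySem.List.sorted (init :: xs) (fun x : Int => x) false :=
    (PySem.List.mem_sorted _ _ _ _).mpr (foldl_max_mem xs init)
  exact le_antisymm (foldl_max_ge xs init _ hLmem) (hge _ hfmem)

-- B's port restated through pvSalaries (definitional)
theorem alt_def (source : List (List (String × String))) (key : String) (init : Int) :
    get_salary_from_alt source key init =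
      if (pvSalaries source key).isEmpty then init
      else (((PySem.Dict.mk
          [("min_salary", PySem.List.pyGetD (PySem.List.sorted (init :: pvSalaries source key) (fun x => x) false) 0 0),
           ("max_salary", PySem.List.pyGetD (PySem.List.sorted (init :: pvSalaries source key) (fun x => x) false) (-1) 0)]).get? key).getD 0) := rfl

-- ===== VERDICT (by name: the statement is the Claim_ definition above) =====
theorem get_salary_from_spec : Claim_equal_get_salary_from := by
  intro source key init _hdom hpre
  unfold Spec_get_salary_from
  show get_salary_from source key init = get_salary_from_alt source key init
  rw [alt_def]
  by_cases hnum : ∃ job ∈ source, PySem.Str.strIsdigit (pvJobGet job key)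
  · have hne : pvSalaries source key ≠ [] := by
      rcases hnum with ⟨j, hj, hd⟩
      simp only [pvSalaries, ne_eq, List.map_eq_nil_iff, List.filter_eq_nil_iff]
      intro h; exact absurd (by simpa using hd) (by simpa using h j hj)
    rw [if_neg (by simpa [List.isEmpty_iff] using hne)]
    rcases hpre.2 hnum with hk | hk <;> subst hk
    · rw [fold_min_eq]
      simp only [PySem.Dict.get?_mk_cons]
      simpa using (sorted_head_eq_foldl_min (pvSalaries source "min_salary") init).symm
    · rw [fold_max_eq]
      simp only [PySem.Dict.get?_mk_cons]
      simpa using (sorted_last_eq_foldl_max (pvSalaries source "max_salary") init).symm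
  · push Not at hnum
    rw [fold_id_of_no_numeric source key init (fun j hj => by simpa using hnum j hj)]
    rw [if_pos (by simp [pvSalaries_nil_of_no_numeric source key
      (fun j hj => by simpa using hnum j hj)])]
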